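-- pv_equiv track=rewrite | github.com/SigmaFireFox/SigmaFox | apps/11sixteen/src/app/APIClients/APIF/APIF_CallStringBuilder.py | apif_build_call_string
-- ===== SOURCE A (Python) =====
-- def apif_build_call_string(league_id, season):
--     # Determine call type
--     call_type = "fixtures"
--
--     # Determine call parameters if any - create a json
--     call_parameters = {'league': league_id, 'season': season}
--
--     # Generate call string
--     call_string = f"/{call_type}"
--
--     if len(call_parameters) > 0:
--         call_string = f"{call_string}?"
--         para_counter = 1
--         for parameter in call_parameters:
--             call_string = f"{call_string}{parameter}={str(call_parameters[parameter])}"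
--             if para_counter < len(call_parameters):
--                 call_string = f"{call_string}&"
--             para_counter += 1
--
--     return call_string
-- ===== SOURCE B (Python) =====
-- def apif_build_call_string(league_id, season):
--     # Closed form: the key set is fixed, so the query string is a direct interpolation.
--     return f"/fixtures?league={league_id}&season={season}"
-- ===== Notes on version B (the rewrite author's own statement) =====
-- stated objective: simpler
-- what changed: B returns the query string as one closed-form f-string, eliminating A's dict, loop and para_counter entirely.
import Mathlib
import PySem

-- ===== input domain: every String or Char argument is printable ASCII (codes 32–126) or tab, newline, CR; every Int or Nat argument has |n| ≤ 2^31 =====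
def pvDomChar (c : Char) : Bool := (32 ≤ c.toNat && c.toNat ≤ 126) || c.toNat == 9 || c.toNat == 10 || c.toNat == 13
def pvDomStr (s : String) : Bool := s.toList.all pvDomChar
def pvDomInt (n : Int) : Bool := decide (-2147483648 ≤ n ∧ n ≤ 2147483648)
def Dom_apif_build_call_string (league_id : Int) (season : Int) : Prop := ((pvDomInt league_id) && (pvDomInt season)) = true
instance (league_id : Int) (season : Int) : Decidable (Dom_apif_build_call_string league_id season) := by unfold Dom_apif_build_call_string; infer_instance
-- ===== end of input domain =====

-- ===== PORT A =====
-- Literal port of A: build the dict, then fold over its keys with para_counter.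
def apif_build_call_string (league_id : Int) (season : Int) : String :=
  let call_type := "fixtures"
  let call_parameters : PySem.Dict String Int :=
    (PySem.Dict.empty.insert "league" league_id).insert "season" season
  let call_string := "/" ++ call_type
  if call_parameters.size > 0 then
    let call_string := call_string ++ "?"
    let (call_string, _) :=
      call_parameters.keys.foldl (fun (st : String × Nat) parameter =>
        let (cs, para_counter) := st
        let cs := cs ++ parameter ++ "=" ++ PySem.Int.toStr (call_parameters.getD parameter 0)
        let cs := if para_counter < call_parameters.size then cs ++ "&" else cs
        (cs, para_counter + 1)) (call_string, 1)
    call_string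
  else
    call_string

-- ===== PORT B =====
-- Port of B: single closed-form interpolation.
def apif_build_call_string_alt (league_id : Int) (season : Int) : String :=
  "/fixtures?league=" ++ PySem.Int.toStr league_id ++ "&season=" ++ PySem.Int.toStr season

-- ===== PRECONDITION & SPEC =====
def Spec_apif_build_call_string (league_id : Int) (season : Int) (out : String) : Prop := out = apif_build_call_string_alt league_id season
instance (league_id : Int) (season : Int) (out : String) : Decidable (Spec_apif_build_call_string league_id season out) := by unfold Spec_apif_build_call_string; infer_instance

-- ===== CLAIM (what is proved, stated in full; the proofs are below) =====
def Claim_equal_apif_build_call_string : Prop := ∀ (league_id : Int) (season : Int), Dom_apif_build_call_string league_id season → Spec_apif_build_call_string league_id season (apif_build_call_string league_id season)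

-- ===== LEMMAS AND PROOFS =====

-- ===== VERDICT (by name: the statement is the Claim_ definition above) =====
theorem apif_build_call_string_spec : Claim_equal_apif_build_call_string := by
  intro league_id season _
  unfold Spec_apif_build_call_string apif_build_call_string apif_build_call_string_alt
  simp [PySem.Dict.insert, PySem.Dict.empty, PySem.Dict.keys, PySem.Dict.size,
        PySem.Dict.getD, PySem.Dict.get?, List.foldl]
  simp [String.append_assoc]
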